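-- pv_equiv track=rewrite | github.com/skezsoftware/daily-tweet-bot | post_to_x.py | get_relevant_hashtags
-- ===== SOURCE A (Python) =====
-- hashtag_categories = {
--     'html': '#WebDev #HTML #FrontEnd #CodingTips',
--     'css': '#CSS #WebDesign #FrontEnd #UIDesign',
--     'javascript': '#JavaScript #WebDev #Programming #CodeTips',
--     'python': '#Python #Programming #CodingTips #PythonProgramming',
--     'react': '#ReactJS #JavaScript #WebDev #FrontEnd',
--     'material-ui': '#MaterialUI #ReactJS #UIDesign #FrontEnd',
--     'bootstrap': '#Bootstrap #WebDesign #FrontEnd #CSS',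
--     'general': '#Programming #CodingTips #DevLife #CodeNewbie',
--     'accessibility': '#a11y #WebAccessibility #Inclusion',
--     'performance': '#WebPerformance #Optimization #DevTips'
-- }
--
-- def get_relevant_hashtags(message):
--     """Determine relevant hashtags based on message content."""
--     hashtags = []
--
--     # Check message content for keywords and add relevant hashtags
--     message_lower = message.lower()
--     if any(term in message_lower for term in ['html', '<header>', '<footer>', '<article>', '<div>', '<section>']):
--         hashtags.append(hashtag_categories['html'])
--     if any(term in message_lower for term in ['css', 'style', 'flexbox', 'grid']):
--         hashtags.append(hashtag_categories['css'])
--     if any(term in message_lower for term in ['javascript', 'async', 'const', 'let']):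
--         hashtags.append(hashtag_categories['javascript'])
--     if any(term in message_lower for term in ['python', 'f-string', 'enumerate']):
--         hashtags.append(hashtag_categories['python'])
--     if any(term in message_lower for term in ['react', 'component', 'useeffect']):
--         hashtags.append(hashtag_categories['react'])
--     if 'material-ui' in message_lower:
--         hashtags.append(hashtag_categories['material-ui'])
--     if 'bootstrap' in message_lower:
--         hashtags.append(hashtag_categories['bootstrap'])
--     if 'accessibility' in message_lower or 'alt attribute' in message_lower:
--         hashtags.append(hashtag_categories['accessibility'])
--     if any(term in message_lower for term in ['performance', 'speed', 'optimize']):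
--         hashtags.append(hashtag_categories['performance'])
--
--     # If no specific category was matched, use general programming hashtags
--     if not hashtags:
--         hashtags.append(hashtag_categories['general'])
--
--     return ' '.join(hashtags)
-- ===== SOURCE B (Python) =====
-- hashtag_categories = {
--     'html': '#WebDev #HTML #FrontEnd #CodingTips',
--     'css': '#CSS #WebDesign #FrontEnd #UIDesign',
--     'javascript': '#JavaScript #WebDev #Programming #CodeTips',
--     'python': '#Python #Programming #CodingTips #PythonProgramming',
--     'react': '#ReactJS #JavaScript #WebDev #FrontEnd',
--     'material-ui': '#MaterialUI #ReactJS #UIDesign #FrontEnd',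
--     'bootstrap': '#Bootstrap #WebDesign #FrontEnd #CSS',
--     'general': '#Programming #CodingTips #DevLife #CodeNewbie',
--     'accessibility': '#a11y #WebAccessibility #Inclusion',
--     'performance': '#WebPerformance #Optimization #DevTips'
-- }
--
-- # (category, trigger terms), in the output order of the categories.
-- RULES = [
--     ('html', ['html', '<header>', '<footer>', '<article>', '<div>', '<section>']),
--     ('css', ['css', 'style', 'flexbox', 'grid']),
--     ('javascript', ['javascript', 'async', 'const', 'let']),
--     ('python', ['python', 'f-string', 'enumerate']),
--     ('react', ['react', 'component', 'useeffect']),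
--     ('material-ui', ['material-ui']),
--     ('bootstrap', ['bootstrap']),
--     ('accessibility', ['accessibility', 'alt attribute']),
--     ('performance', ['performance', 'speed', 'optimize']),
-- ]
--
-- def get_relevant_hashtags(message):
--     """Determine relevant hashtags based on message content.
--
--     Single left-to-right scan over the text: at each position, check which
--     trigger terms start there and collect the matched categories in a set;
--     the per-term substring searches of the original disappear.
--     """
--     ml = message.lower()
--     matched = set()
--     for i in range(len(ml)):
--         for cat, terms in RULES:
--             if any(ml.startswith(t, i) for t in terms):
--                 matched.add(cat)
--     hashtags = [hashtag_categories[cat] for cat, _ in RULES if cat in matched]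
--     if not hashtags:
--         hashtags.append(hashtag_categories['general'])
--     return ' '.join(hashtags)
-- ===== Notes on version B (the rewrite author's own statement) =====
-- stated objective: alternative
-- what changed: Replaces ten per-keyword Python substring-membership searches with one position-by-position left-to-right scan of the lowered message that collects matched categories into a set (checking which trigger terms start at each index), then emits the tags of matched categories in rule order.
import Mathlib
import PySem

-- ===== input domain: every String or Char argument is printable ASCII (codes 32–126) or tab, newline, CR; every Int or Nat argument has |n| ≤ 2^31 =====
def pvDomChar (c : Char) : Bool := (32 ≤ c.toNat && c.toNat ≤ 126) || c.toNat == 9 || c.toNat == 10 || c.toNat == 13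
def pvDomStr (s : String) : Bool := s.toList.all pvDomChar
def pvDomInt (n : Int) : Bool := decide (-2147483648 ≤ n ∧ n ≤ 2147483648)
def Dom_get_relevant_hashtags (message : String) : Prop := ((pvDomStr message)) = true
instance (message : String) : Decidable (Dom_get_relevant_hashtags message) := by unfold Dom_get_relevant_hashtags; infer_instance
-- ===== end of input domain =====

-- B replaces A's ten per-keyword substring searches with one positional left-to-right scan of the
-- lowered message collecting matched categories into a set (alternative algorithm; same output).

-- ===== PORT A =====
-- the module-level dict hashtag_categories
def hashtagCategories : PySem.Dict String String := PySem.Dict.ofList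
  [ ("html", "#WebDev #HTML #FrontEnd #CodingTips"),
    ("css", "#CSS #WebDesign #FrontEnd #UIDesign"),
    ("javascript", "#JavaScript #WebDev #Programming #CodeTips"),
    ("python", "#Python #Programming #CodingTips #PythonProgramming"),
    ("react", "#ReactJS #JavaScript #WebDev #FrontEnd"),
    ("material-ui", "#MaterialUI #ReactJS #UIDesign #FrontEnd"),
    ("bootstrap", "#Bootstrap #WebDesign #FrontEnd #CSS"),
    ("general", "#Programming #CodingTips #DevLife #CodeNewbie"),
    ("accessibility", "#a11y #WebAccessibility #Inclusion"),
    ("performance", "#WebPerformance #Optimization #DevTips") ]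

-- keys are present, so Python's d[k] (KeyError never raised here) is ported as getD with "" default
def catA (k : String) : String := (hashtagCategories.get? k).getD ""

def get_relevant_hashtags (message : String) : String :=
  let message_lower := PySem.Str.lower message
  let hashtags : List String := []
  let hashtags := if ["html", "<header>", "<footer>", "<article>", "<div>", "<section>"].any
      (fun term => PySem.Str.isIn term message_lower) then hashtags ++ [catA "html"] else hashtags
  let hashtags := if ["css", "style", "flexbox", "grid"].any
      (fun term => PySem.Str.isIn term message_lower) then hashtags ++ [catA "css"] else hashtags
  let hashtags := if ["javascript", "async", "const", "let"].any
      (fun term => PySem.Str.isIn term message_lower) then hashtags ++ [catA "javascript"] else hashtags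
  let hashtags := if ["python", "f-string", "enumerate"].any
      (fun term => PySem.Str.isIn term message_lower) then hashtags ++ [catA "python"] else hashtags
  let hashtags := if ["react", "component", "useeffect"].any
      (fun term => PySem.Str.isIn term message_lower) then hashtags ++ [catA "react"] else hashtags
  let hashtags := if PySem.Str.isIn "material-ui" message_lower then hashtags ++ [catA "material-ui"] else hashtags
  let hashtags := if PySem.Str.isIn "bootstrap" message_lower then hashtags ++ [catA "bootstrap"] else hashtags
  let hashtags := if PySem.Str.isIn "accessibility" message_lower || PySem.Str.isIn "alt attribute" message_lower
      then hashtags ++ [catA "accessibility"] else hashtags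
  let hashtags := if ["performance", "speed", "optimize"].any
      (fun term => PySem.Str.isIn term message_lower) then hashtags ++ [catA "performance"] else hashtags
  let hashtags := if hashtags.isEmpty then hashtags ++ [catA "general"] else hashtags
  PySem.Str.join " " hashtags

-- ===== PORT B =====
-- the ordered rule table RULES
def bRules : List (String × List String) :=
  [ ("html", ["html", "<header>", "<footer>", "<article>", "<div>", "<section>"]),
    ("css", ["css", "style", "flexbox", "grid"]),
    ("javascript", ["javascript", "async", "const", "let"]),
    ("python", ["python", "f-string", "enumerate"]),
    ("react", ["react", "component", "useeffect"]),
    ("material-ui", ["material-ui"]),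
    ("bootstrap", ["bootstrap"]),
    ("accessibility", ["accessibility", "alt attribute"]),
    ("performance", ["performance", "speed", "optimize"]) ]

-- ml.startswith(t, i) with 0 ≤ i is exactly: t is a prefix of ml[i:] — ported as List.isPrefixOf on the dropped suffix
def get_relevant_hashtags_alt (message : String) : String :=
  let ml : List Char := (PySem.Str.lower message).toList
  let matched : PySem.Set String :=
    (List.range ml.length).foldl
      (fun s i => bRules.foldl
        (fun s r => if r.2.any (fun t => t.toList.isPrefixOf (ml.drop i)) then PySem.Set.add s r.1 else s) s)
      PySem.Set.empty
  let hashtags : List String :=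
    (bRules.filter (fun r => PySem.Set.contains matched r.1)).map
      (fun r => (hashtagCategories.get? r.1).getD "")
  let hashtags := if hashtags.isEmpty then hashtags ++ [(hashtagCategories.get? "general").getD ""] else hashtags
  PySem.Str.join " " hashtags

-- ===== PRECONDITION & SPEC =====
def Spec_get_relevant_hashtags (message : String) (out : String) : Prop := out = get_relevant_hashtags_alt message
instance (message : String) (out : String) : Decidable (Spec_get_relevant_hashtags message out) := by unfold Spec_get_relevant_hashtags; infer_instance

-- ===== CLAIM (what is proved, stated in full; the proofs are below) =====
def Claim_equal_get_relevant_hashtags : Prop := ∀ (message : String), Dom_get_relevant_hashtags message → Spec_get_relevant_hashtags message (get_relevant_hashtags message)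

-- ===== LEMMAS AND PROOFS =====

-- membership in the set built by B's inner fold over the rules at one position
theorem mem_foldl_rules (ml : List Char) (i : Nat) (c : String) :
    ∀ (rules : List (String × List String)) (s0 : PySem.Set String),
      c ∈ rules.foldl
        (fun s r => if r.2.any (fun t => t.toList.isPrefixOf (ml.drop i)) then PySem.Set.add s r.1 else s) s0
      ↔ c ∈ s0 ∨ ∃ r ∈ rules, r.1 = c ∧ r.2.any (fun t => t.toList.isPrefixOf (ml.drop i)) = true := by
  intro rules
  induction rules with
  | nil => intro s0; simp
  | cons r rs ih =>
    intro s0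
    by_cases h : r.2.any (fun t => t.toList.isPrefixOf (ml.drop i)) = true
    · simp only [List.foldl_cons, h, if_true, ih, PySem.Set.mem_add]
      constructor
      · rintro (⟨hc | hc⟩ | ⟨r', hr', hc, hp⟩)
        · exact Or.inl hc
        · exact Or.inr ⟨r, List.mem_cons_self, hc.symm, h⟩
        · exact Or.inr ⟨r', List.mem_cons_of_mem _ hr', hc, hp⟩
      · rintro (hc | ⟨r', hr', hc, hp⟩)
        · exact Or.inl (Or.inl hc)
        · rcases List.mem_cons.mp hr' with rfl | hr'
          · exact Or.inl (Or.inr hc.symm)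
          · exact Or.inr ⟨r', hr', hc, hp⟩
    · simp only [List.foldl_cons, h, ih]
      constructor
      · rintro (hc | ⟨r', hr', hc, hp⟩)
        · exact Or.inl hc
        · exact Or.inr ⟨r', List.mem_cons_of_mem _ hr', hc, hp⟩
      · rintro (hc | ⟨r', hr', hc, hp⟩)
        · exact Or.inl hc
        · rcases List.mem_cons.mp hr' with rfl | hr'
          · exact absurd hp h
          · exact Or.inr ⟨r', hr', hc, hp⟩

-- membership in the set built by B's whole positional scan
theorem mem_scan (ml : List Char) (c : String) :
    ∀ (idxs : List Nat) (s0 : PySem.Set String),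
      c ∈ idxs.foldl
        (fun s i => bRules.foldl
          (fun s r => if r.2.any (fun t => t.toList.isPrefixOf (ml.drop i)) then PySem.Set.add s r.1 else s) s) s0
      ↔ c ∈ s0 ∨ ∃ i ∈ idxs, ∃ r ∈ bRules, r.1 = c ∧ r.2.any (fun t => t.toList.isPrefixOf (ml.drop i)) = true := by
  intro idxs
  induction idxs with
  | nil => intro s0; simp
  | cons i is ih =>
    intro s0
    rw [List.foldl_cons, ih, mem_foldl_rules]
    constructor
    · rintro (⟨hc | ⟨r, hr, hc, hp⟩⟩ | ⟨j, hj, hrest⟩)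
      · exact Or.inl hc
      · exact Or.inr ⟨i, List.mem_cons_self, r, hr, hc, hp⟩
      · exact Or.inr ⟨j, List.mem_cons_of_mem _ hj, hrest⟩
    · rintro (hc | ⟨j, hj, hrest⟩)
      · exact Or.inl (Or.inl hc)
      · rcases List.mem_cons.mp hj with rfl | hj
        · exact Or.inl (Or.inr hrest)
        · exact Or.inr ⟨j, hj, hrest⟩

-- a nonempty term starts at some position < length iff it is a substring
theorem exists_pos_prefix_iff (t ml : List Char) (ht : t ≠ []) :
    (∃ i < ml.length, t <+: ml.drop i) ↔ PySem.Chars.isIn t ml = true := by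
  rw [← PySem.Chars.exists_prefix_drop_iff_isIn]
  constructor
  · rintro ⟨i, _, h⟩; exact ⟨i, h⟩
  · rintro ⟨i, h⟩
    by_cases hi : i < ml.length
    · exact ⟨i, hi, h⟩
    · rw [List.drop_eq_nil_of_le (by omega)] at h
      exact absurd (List.prefix_nil.mp h) ht

-- for one rule of the table, set membership after the scan is A's "any term in message" test
theorem contains_scan_eq (ml : List Char) (c : String) (terms : List String)
    (hmem : (c, terms) ∈ bRules)
    (huniq : ∀ r ∈ bRules, r.1 = c → r.2 = terms)
    (hne : ∀ t ∈ terms, t.toList ≠ []) :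
    PySem.Set.contains
      ((List.range ml.length).foldl
        (fun s i => bRules.foldl
          (fun s r => if r.2.any (fun t => t.toList.isPrefixOf (ml.drop i)) then PySem.Set.add s r.1 else s) s)
        PySem.Set.empty) c
    = terms.any (fun t => PySem.Chars.isIn t.toList ml) := by
  rw [Bool.eq_iff_iff, PySem.Set.contains_iff, mem_scan]
  simp only [PySem.Set.empty, List.not_mem_nil, false_or, List.mem_range, List.any_eq_true,
    List.isPrefixOf_iff_prefix]
  constructor
  · rintro ⟨i, hi, r, hr, hc, t, ht, hp⟩
    have := huniq r hr hc
    exact ⟨t, this ▸ ht, (exists_pos_prefix_iff _ _ (hne t (this ▸ ht))).mp ⟨i, hi, hp⟩⟩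
  · rintro ⟨t, ht, hin⟩
    obtain ⟨i, hi, hp⟩ := (exists_pos_prefix_iff _ _ (hne t ht)).mpr hin
    exact ⟨i, hi, (c, terms), hmem, rfl, t, ht, hp⟩

-- a filter-then-map pass over the rule list equals the if-append left fold A's if-chain unfolds to
theorem filterMap_eq_foldl {α β : Type} (p : α → Bool) (f : α → β) :
    ∀ (rules : List α) (acc : List β),
      acc ++ (rules.filter p).map f
        = rules.foldl (fun a r => if p r then a ++ [f r] else a) acc := by
  intro rules
  induction rules with
  | nil => intro acc; simp
  | cons r rs ih => intro acc; by_cases h : p r = true <;> simp [h, ← ih]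

theorem filterMap_eq_foldl' {α β : Type} (p : α → Bool) (f : α → β) (rules : List α) :
    (rules.filter p).map f = rules.foldl (fun a r => if p r then a ++ [f r] else a) [] := by
  simpa using filterMap_eq_foldl p f rules []

-- the scan-set filter over the rules coincides with the per-term substring-test filter
theorem filter_scan_eq (ml : List Char) :
    bRules.filter (fun r => PySem.Set.contains
      ((List.range ml.length).foldl
        (fun s i => bRules.foldl
          (fun s r => if r.2.any (fun t => t.toList.isPrefixOf (ml.drop i)) then PySem.Set.add s r.1 else s) s)
        PySem.Set.empty) r.1)
    = bRules.filter (fun r => r.2.any (fun t => PySem.Chars.isIn t.toList ml)) := by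
  apply List.filter_congr
  intro r hr
  fin_cases hr <;> exact contains_scan_eq ml _ _ (by decide) (by decide) (by decide)

-- ===== VERDICT (by name: the statement is the Claim_ definition above) =====
theorem get_relevant_hashtags_spec : Claim_equal_get_relevant_hashtags := by
  intro message _
  show get_relevant_hashtags message = get_relevant_hashtags_alt message
  simp only [get_relevant_hashtags_alt, filter_scan_eq, filterMap_eq_foldl']
  simp only [get_relevant_hashtags, catA, bRules, List.foldl_cons, List.foldl_nil,
    List.any_cons, List.any_nil, Bool.or_false, PySem.Str.isIn_eq, PySem.Str.toList_lower]
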